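-- pv_equiv track=rewrite | github.com/yourstrulycreator/ai-agent | data_extractor.py | _is_organization_bs4
-- ===== SOURCE A (Python) =====
-- def _is_organization_bs4(name, title, company, url):
--     """Improved detection of organizations in BeautifulSoup extraction"""
--     # Check URL pattern - organizations don't have /in/ in their URLs
--     if url and '/in/' not in url and 'linkedin.com/in/' not in url:
--         return True
--
--     # Check for organization indicators in the name
--     org_indicators = [
--         "University", "School", "College", "Academy", "Institute",
--         "Department", "Corporation", "Inc", "LLC", "Ltd", "Limited", "Company",
--         "Organization", "Organisation", "Foundation", "Association",
--         "Society", "Group", "Agency", "Bureau", "Office", "Ministry",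
--         "Committee", "Council", "Board", "Authority", "Commission",
--         "Global", "International", "National", "Federal", "State",
--         "Enterprise", "Ventures", "Partners", "Industries", "Solutions",
--         "Systems", "Technologies", "Services", "Platform", "Network",
--         "freeCodeCamp", "Bootcamp", "E-learning"
--     ]
--
--     # Check if name contains organization indicators
--     for indicator in org_indicators:
--         if indicator.lower() in name.lower():
--             return True
--
--     # Check if name is too short (likely not a person)
--     if len(name.split()) < 2:
--         return True
--
--     return False
-- ===== SOURCE B (Python) =====
-- _ORG_INDICATORS = (
--     "university school college academy institute department corporation inc "
--     "llc ltd limited company organization organisation foundation association "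
--     "society group agency bureau office ministry committee council board "
--     "authority commission global international national federal state "
--     "enterprise ventures partners industries solutions systems technologies "
--     "services platform network freecodecamp bootcamp e-learning"
-- ).split()
--
-- # Index the indicators by first letter so one pass over the name only tests
-- # the few indicators that could start at each position.
-- _BY_FIRST = {}
-- for _ind in _ORG_INDICATORS:
--     _BY_FIRST.setdefault(_ind[0], []).append(_ind)
--
--
-- def _is_organization_bs4(name, title, company, url):
--     """Improved detection of organizations in BeautifulSoup extraction"""
--     if url and '/in/' not in url and 'linkedin.com/in/' not in url:
--         return True
--
--     lowered = name.lower()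
--     for i, ch in enumerate(lowered):
--         for ind in _BY_FIRST.get(ch, ()):
--             if lowered.startswith(ind, i):
--                 return True
--
--     return len(name.split()) < 2
-- ===== Notes on version B (the rewrite author's own statement) =====
-- stated objective: alternative
-- what changed: Replaces the k independent case-insensitive substring searches (one 'indicator.lower() in name.lower()' per indicator) by a first-letter index: a dict from first character to its indicators is built once, and a single enumerate pass over the lowered name tests only the bucket of indicators that could start at each position via str.startswith(ind, i).
import Mathlib
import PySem

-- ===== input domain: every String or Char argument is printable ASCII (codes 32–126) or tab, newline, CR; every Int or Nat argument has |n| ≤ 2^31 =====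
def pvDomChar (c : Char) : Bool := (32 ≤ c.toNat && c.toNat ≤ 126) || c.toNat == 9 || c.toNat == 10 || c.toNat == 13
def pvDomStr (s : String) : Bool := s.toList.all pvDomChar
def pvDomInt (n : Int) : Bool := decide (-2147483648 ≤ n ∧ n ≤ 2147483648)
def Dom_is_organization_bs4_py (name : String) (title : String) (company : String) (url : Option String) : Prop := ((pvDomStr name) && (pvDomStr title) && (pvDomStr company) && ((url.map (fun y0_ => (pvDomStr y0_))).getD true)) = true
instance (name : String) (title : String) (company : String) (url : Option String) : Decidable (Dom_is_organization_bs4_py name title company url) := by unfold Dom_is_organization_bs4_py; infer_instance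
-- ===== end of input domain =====

set_option maxRecDepth 10000
set_option maxHeartbeats 1000000


-- B indexes the lowered indicators by first letter and makes one enumerate pass
-- over the lowered name, testing only the matching bucket at each position
-- (objective: alternative, not measured faster).

-- ===== PORT A =====
def pvOrgIndicators : List String :=
  ["University", "School", "College", "Academy", "Institute",
   "Department", "Corporation", "Inc", "LLC", "Ltd", "Limited", "Company",
   "Organization", "Organisation", "Foundation", "Association",
   "Society", "Group", "Agency", "Bureau", "Office", "Ministry",
   "Committee", "Council", "Board", "Authority", "Commission",
   "Global", "International", "National", "Federal", "State",
   "Enterprise", "Ventures", "Partners", "Industries", "Solutions",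
   "Systems", "Technologies", "Services", "Platform", "Network",
   "freeCodeCamp", "Bootcamp", "E-learning"]

-- the 'for indicator in org_indicators' loop of A, with its early return
def pvLoopA (name : String) : List String → Bool
  | [] => false
  | ind :: rest =>
      if PySem.Str.isIn (PySem.Str.lower ind) (PySem.Str.lower name) then true
      else pvLoopA name rest

def is_organization_bs4_py (name : String) (title : String) (company : String) (url : Option String) : Bool :=
  -- if url and '/in/' not in url and 'linkedin.com/in/' not in url: return True
  if (match url with
      | some u => !(u == "") && !(PySem.Str.isIn "/in/" u) && !(PySem.Str.isIn "linkedin.com/in/" u)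
      | none => false) then true
  else if pvLoopA name pvOrgIndicators then true
  else if PySem.List.len (PySem.Str.split₀ name) < 2 then true
  else false

-- ===== PORT B =====
-- the module-level '(...).split()' of Source B
def pvIndList : List String :=
  PySem.Str.split₀ ("university school college academy institute department corporation inc llc ltd limited company organization organisation foundation association society group agency bureau office ministry committee council board authority commission global international national federal state enterprise ventures partners industries solutions systems technologies services platform network freecodecamp bootcamp e-learning")

-- the module-level loop '_BY_FIRST.setdefault(_ind[0], []).append(_ind)'
-- (the 'none' branch of _ind[0] is unreachable: split() yields no empty word)
def pvByFirst : PySem.Dict Char (List String) :=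
  pvIndList.foldl (fun d ind =>
    match PySem.Str.pyGet? ind 0 with
    | some c => d.modify c [] (fun l => l ++ [ind])
    | none => d) PySem.Dict.empty

-- 'for i, ch in enumerate(lowered): for ind in _BY_FIRST.get(ch, ()): if lowered.startswith(ind, i)'
-- walking the suffix at position i; startswith(ind, i) is startswith on the suffix
def pvScanB (d : PySem.Dict Char (List String)) : List Char → Bool
  | [] => false
  | c :: t => ((d.getD c []).any fun ind => PySem.Chars.startswith (c :: t) ind.toList) || pvScanB d t

def is_organization_bs4_py_alt (name : String) (title : String) (company : String) (url : Option String) : Bool :=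
  if (match url with
      | some u => !(u == "") && !(PySem.Str.isIn "/in/" u) && !(PySem.Str.isIn "linkedin.com/in/" u)
      | none => false) then true
  else if pvScanB pvByFirst (PySem.Str.lower name).toList then true
  else decide (PySem.List.len (PySem.Str.split₀ name) < 2)

-- ===== PRECONDITION & SPEC =====
def Spec_is_organization_bs4_py (name : String) (title : String) (company : String) (url : Option String) (out : Bool) : Prop := out = is_organization_bs4_py_alt name title company url
instance (name : String) (title : String) (company : String) (url : Option String) (out : Bool) : Decidable (Spec_is_organization_bs4_py name title company url out) := by unfold Spec_is_organization_bs4_py; infer_instance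

-- ===== CLAIM =====
def Claim_equal_is_organization_bs4_py : Prop := ∀ (name : String) (title : String) (company : String) (url : Option String), Dom_is_organization_bs4_py name title company url → Spec_is_organization_bs4_py name title company url (is_organization_bs4_py name title company url)

-- ===== LEMMAS AND PROOFS =====

-- the bucket-building foldl collects, per first letter, exactly the words with that first letter, in order
theorem pvBucket_foldl (L : List String) (d : PySem.Dict Char (List String)) (c : Char) :
    (L.foldl (fun d ind =>
        match PySem.Str.pyGet? ind 0 with
        | some c => d.modify c [] (fun l => l ++ [ind])
        | none => d) d).getD c []
      = d.getD c [] ++ L.filter (fun ind => PySem.Str.pyGet? ind 0 == some c) := by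
  induction L generalizing d with
  | nil => simp
  | cons ind L ih =>
      simp only [List.foldl_cons, List.filter_cons, ih]
      cases h : PySem.Str.pyGet? ind 0 with
      | none => simp
      | some c' =>
          by_cases hc : c = c'
          · subst hc
            simp [PySem.Dict.getD_modify_self]
          · simp [PySem.Dict.getD_modify_of_ne d [] (fun l => l ++ [ind]) hc]
            exact fun he => hc (Eq.symm he)

theorem pvMem_bucket (c : Char) (ind : String) :
    ind ∈ pvByFirst.getD c [] ↔ ind ∈ pvIndList ∧ PySem.Str.pyGet? ind 0 = some c := by
  unfold pvByFirst
  rw [pvBucket_foldl]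
  simp [List.mem_filter]

-- no word of the split is empty
theorem pvIndList_ne_nil : ∀ ind ∈ pvIndList, ind.toList ≠ [] := by decide

-- B's scan finds exactly the indicator words that are prefixes of some suffix
theorem pvScanB_iff (s : List Char) :
    pvScanB pvByFirst s = true ↔ ∃ ind ∈ pvIndList, ∃ j, ind.toList <+: s.drop j := by
  induction s with
  | nil =>
      simp only [pvScanB]
      constructor
      · intro h; cases h
      · rintro ⟨ind, hmem, j, hpre⟩
        exact absurd (List.prefix_nil.mp (by simpa using hpre)) (pvIndList_ne_nil ind hmem)
  | cons c t ih =>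
      simp only [pvScanB, Bool.or_eq_true, List.any_eq_true, PySem.Chars.startswith_iff, ih]
      constructor
      · rintro (⟨ind, hmem, hpre⟩ | ⟨ind, hmem, j, hpre⟩)
        · exact ⟨ind, (pvMem_bucket c ind).mp hmem |>.1, 0, by simpa using hpre⟩
        · exact ⟨ind, hmem, j + 1, by simpa using hpre⟩
      · rintro ⟨ind, hmem, j, hpre⟩
        cases j with
        | zero =>
            left
            simp only [List.drop_zero] at hpre
            refine ⟨ind, (pvMem_bucket c ind).mpr ⟨hmem, ?_⟩, hpre⟩
            cases hl : ind.toList with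
            | nil => exact absurd hl (pvIndList_ne_nil ind hmem)
            | cons a l =>
                rw [hl] at hpre
                obtain ⟨u, hu⟩ := hpre
                simp [PySem.Str.pyGet?_eq, hl, (List.cons.injEq _ _ _ _ ▸ hu).1]
        | succ j => exact Or.inr ⟨ind, hmem, j, by simpa using hpre⟩

-- A's loop is an existential over the indicator list
theorem pvLoopA_iff (name : String) (inds : List String) :
    pvLoopA name inds = true ↔
      ∃ ind ∈ inds, PySem.Str.isIn (PySem.Str.lower ind) (PySem.Str.lower name) = true := by
  induction inds with
  | nil => simp [pvLoopA]
  | cons ind rest ih =>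
      simp only [pvLoopA]
      split_ifs with h
      · exact iff_of_true rfl ⟨ind, List.mem_cons_self, h⟩
      · rw [ih]
        constructor
        · rintro ⟨a, ha, hin⟩
          exact ⟨a, List.mem_cons_of_mem _ ha, hin⟩
        · rintro ⟨a, ha, hin⟩
          rcases List.mem_cons.mp ha with rfl | ha
          · exact absurd hin h
          · exact ⟨a, ha, hin⟩

-- B's word list is A's list, lowered
theorem pvIndList_eq : pvIndList = pvOrgIndicators.map (fun ind => PySem.Str.lower ind) := by
  decide

-- the two indicator checks agree
theorem pvScan_eq_loop (name : String) :
    pvScanB pvByFirst (PySem.Str.lower name).toList = pvLoopA name pvOrgIndicators := by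
  rw [Bool.eq_iff_iff, pvScanB_iff, pvLoopA_iff, pvIndList_eq]
  constructor
  · rintro ⟨ind, hmem, hj⟩
    rcases List.mem_map.mp hmem with ⟨ind0, hmem0, rfl⟩
    refine ⟨ind0, hmem0, ?_⟩
    rw [PySem.Str.isIn_eq, ← PySem.Chars.exists_prefix_drop_iff_isIn]
    exact hj
  · rintro ⟨ind0, hmem0, hin⟩
    refine ⟨PySem.Str.lower ind0, List.mem_map.mpr ⟨ind0, hmem0, rfl⟩, ?_⟩
    rw [PySem.Str.isIn_eq, ← PySem.Chars.exists_prefix_drop_iff_isIn] at hin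
    exact hin

-- ===== VERDICT =====
theorem is_organization_bs4_py_spec : Claim_equal_is_organization_bs4_py := by
  intro name title company url _
  unfold Spec_is_organization_bs4_py is_organization_bs4_py is_organization_bs4_py_alt
  rw [pvScan_eq_loop]
  split_ifs <;> simp_all
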